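-- pv_equiv track=rewrite | github.com/Unicser-tkmk/DML_Shared_Traffic_Calculator | Calculator.py | evaluate_wave_from_pattern
-- ===== SOURCE A (Python) =====
-- def evaluate_wave_from_pattern(time, pattern, offset=0):
--     """
--     Evaluate the binary wave (0 or 1) at a given time from the run–length pattern.
--     """
--     period = sum(abs(x) for x in pattern)
--     mod_time = (time - offset) % period
--     current = 0
--     for x in pattern:
--         current += abs(x)
--         if mod_time < current:
--             return 1 if x > 0 else 0
--     return 0
-- ===== SOURCE B (Python) =====
-- import bisect
-- import itertools
--
--
-- def evaluate_wave_from_pattern(time, pattern, offset=0):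
--     period = sum(abs(x) for x in pattern)
--     mod_time = (time - offset) % period
--     cum = list(itertools.accumulate(abs(x) for x in pattern))
--     i = bisect.bisect_right(cum, mod_time)
--     return 1 if pattern[i] > 0 else 0
-- ===== Notes on version B (the rewrite author's own statement) =====
-- stated objective: alternative
-- what changed: Replaces the running-accumulator linear scan with an explicit prefix-sum table built by itertools.accumulate and a bisect_right binary search that locates the run containing the wrapped time.
import Mathlib
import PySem

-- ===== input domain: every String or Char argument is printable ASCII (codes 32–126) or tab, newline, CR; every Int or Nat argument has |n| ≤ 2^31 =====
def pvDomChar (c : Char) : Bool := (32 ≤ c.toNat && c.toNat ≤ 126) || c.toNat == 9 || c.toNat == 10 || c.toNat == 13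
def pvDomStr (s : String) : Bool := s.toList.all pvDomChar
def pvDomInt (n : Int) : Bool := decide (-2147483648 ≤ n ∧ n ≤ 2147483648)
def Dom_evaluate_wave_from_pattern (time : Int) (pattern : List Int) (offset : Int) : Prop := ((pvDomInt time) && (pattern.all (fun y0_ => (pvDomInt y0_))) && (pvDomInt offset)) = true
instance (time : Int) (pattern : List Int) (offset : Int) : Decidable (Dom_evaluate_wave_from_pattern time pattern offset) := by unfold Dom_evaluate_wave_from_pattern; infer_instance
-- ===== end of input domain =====

-- B replaces A's running-accumulator scan by a prefix-sum table plus bisect_right; alternative structure, same cost class.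

-- ===== PORT A =====
-- the 'for x in pattern' loop with early return, carrying the accumulator 'current'
def pvGoA (mod_time : Int) : List Int → Int → Int
  | [], _ => 0
  | x :: xs, current =>
      let current' := current + |x|
      if mod_time < current' then (if x > 0 then 1 else 0) else pvGoA mod_time xs current'

def evaluate_wave_from_pattern (time : Int) (pattern : List Int) (offset : Int) : Int :=
  let period := (pattern.map (fun x => |x|)).sum
  let mod_time := PySem.Int.mod (time - offset) period  -- raises ZeroDivisionError when period = 0: excluded by Pre_
  pvGoA mod_time pattern 0

-- ===== PORT B =====
-- itertools.accumulate of abs(x), starting total c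
def pvCum (c : Int) : List Int → List Int
  | [] => []
  | x :: xs => (c + |x|) :: pvCum (c + |x|) xs

-- bisect.bisect_right on the (nondecreasing) prefix-sum list: first index with cum[i] > m
def pvBisectRight (cum : List Int) (m : Int) : Nat :=
  (cum.takeWhile (fun t => decide (t ≤ m))).length

def evaluate_wave_from_pattern_alt (time : Int) (pattern : List Int) (offset : Int) : Int :=
  let period := (pattern.map (fun x => |x|)).sum
  let mod_time := PySem.Int.mod (time - offset) period  -- raises ZeroDivisionError when period = 0: excluded by Pre_
  let cum := pvCum 0 pattern
  let i := pvBisectRight cum mod_time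
  match PySem.List.pyGet? pattern (Int.ofNat i) with  -- pattern[i]; IndexError (none) unreachable under Pre_
  | some x => if x > 0 then 1 else 0
  | none => 0

-- ===== PRECONDITION & SPEC =====
-- Pre_ excludes exactly the inputs where the pattern's absolute sum is 0 (empty or all-zero pattern),
-- on which Python A raises ZeroDivisionError.
def Pre_evaluate_wave_from_pattern (time : Int) (pattern : List Int) (offset : Int) : Prop :=
  (pattern.map (fun x => |x|)).sum ≠ 0
instance (time : Int) (pattern : List Int) (offset : Int) : Decidable (Pre_evaluate_wave_from_pattern time pattern offset) := by unfold Pre_evaluate_wave_from_pattern; infer_instance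

def pvWitness_evaluate_wave_from_pattern : Int × List Int × Int := (7, [2, -3, 1], 1)

def Spec_evaluate_wave_from_pattern (time : Int) (pattern : List Int) (offset : Int) (out : Int) : Prop := out = evaluate_wave_from_pattern_alt time pattern offset
instance (time : Int) (pattern : List Int) (offset : Int) (out : Int) : Decidable (Spec_evaluate_wave_from_pattern time pattern offset out) := by unfold Spec_evaluate_wave_from_pattern; infer_instance

-- ===== CLAIM (what is proved, stated in full; the proofs are below) =====
def Claim_equal_evaluate_wave_from_pattern : Prop := ∀ (time : Int) (pattern : List Int) (offset : Int), Dom_evaluate_wave_from_pattern time pattern offset → Pre_evaluate_wave_from_pattern time pattern offset → Spec_evaluate_wave_from_pattern time pattern offset (evaluate_wave_from_pattern time pattern offset)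

-- ===== LEMMAS AND PROOFS =====

-- A's scan started at accumulator c equals indexing by bisect_right on prefix sums started at c.
theorem pvGoA_eq_bisect (m : Int) (xs : List Int) (c : Int) :
    pvGoA m xs c =
      (match xs[pvBisectRight (pvCum c xs) m]? with
       | some x => if x > 0 then (1 : Int) else 0
       | none => 0) := by
  induction xs generalizing c with
  | nil => simp [pvGoA, pvCum, pvBisectRight]
  | cons x xs ih =>
      simp only [pvGoA, pvCum, pvBisectRight, List.takeWhile]
      by_cases h : m < c + |x|
      · have : (decide (c + |x| ≤ m)) = false := by simp; omega
        simp [h, this]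
      · have : (decide (c + |x| ≤ m)) = true := by simp; omega
        simp [h, this, pvBisectRight, ih (c + |x|)]

theorem pvWitness_dom_pre :
    Dom_evaluate_wave_from_pattern pvWitness_evaluate_wave_from_pattern.1 pvWitness_evaluate_wave_from_pattern.2.1 pvWitness_evaluate_wave_from_pattern.2.2 ∧
    Pre_evaluate_wave_from_pattern pvWitness_evaluate_wave_from_pattern.1 pvWitness_evaluate_wave_from_pattern.2.1 pvWitness_evaluate_wave_from_pattern.2.2 := by
  decide

-- ===== VERDICT (by name: the statement is the Claim_ definition above) =====
theorem evaluate_wave_from_pattern_spec : Claim_equal_evaluate_wave_from_pattern := by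
  intro time pattern offset _ _
  unfold Spec_evaluate_wave_from_pattern evaluate_wave_from_pattern evaluate_wave_from_pattern_alt
  simp only [Int.ofNat_eq_natCast, PySem.List.pyGet?_natCast]
  exact pvGoA_eq_bisect _ pattern 0
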